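-- pv_equiv track=rewrite | github.com/HussainAther/DFlow-Peptide-Membrane | dflow_reversible.py | _choose_bridge_cut_smallest_first
-- ===== SOURCE A (Python) =====
-- from typing import Optional, List, Tuple, Dict, Iterable
--
-- def _subcomponents_after_cut(nodes_set, adj, cut):
--     """Return two node-sets after removing edge 'cut' = (u,v) from the induced graph."""
--     u, v = cut
--
--     def bfs(start, block):
--         seen = set()
--         stack = [start]
--         bu, bv = block
--         while stack:
--             x = stack.pop()
--             if x in seen:
--                 continue
--             seen.add(x)
--             for w in adj.get(x, ()):
--                 if (x == bu and w == bv) or (x == bv and w == bu):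
--                     continue
--                 if w not in seen:
--                     stack.append(w)
--         return seen
--
--     u_side = bfs(u, (u, v))
--     v_side = nodes_set - u_side
--     return u_side, v_side
--
-- def _choose_bridge_cut_smallest_first(nodes_set: set[int], adj: Dict[int, set[int]], bridges: Iterable[Tuple[int,int]]):
--     """
--     Deterministically choose a bridge:
--       1) minimize min(|u_side|, |v_side|)
--       2) tie-break by lexicographic (u, v) with u < v
--     Returns the chosen cut (u, v).
--     """
--     best = None
--     for cut in bridges:
--         u, v = cut if cut[0] < cut[1] else (cut[1], cut[0])
--         u_side, v_side = _subcomponents_after_cut(nodes_set, adj, (u, v))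
--         if not u_side or not v_side:
--             continue
--         small = min(len(u_side), len(v_side))
--         key = (small, (u, v))
--         if best is None or key < best[0]:
--             best = (key, (u, v))
--     return None if best is None else best[1]
-- ===== SOURCE B (Python) =====
-- def _reach(adj, u, v):
--     """Nodes reachable from u following adjacency, never crossing u->v or v->u.
--
--     Computed by layered frontier expansion (no stack, no per-node pops)."""
--     reach = {u}
--     frontier = {u}
--     while frontier:
--         nxt = set()
--         for x in frontier:
--             for w in adj.get(x, ()):
--                 if (x == u and w == v) or (x == v and w == u):
--                     continue
--                 if w not in reach:
--                     nxt.add(w)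
--         reach |= nxt
--         frontier = nxt
--     return reach
--
-- def _choose_bridge_cut_smallest_first(nodes_set, adj, bridges):
--     cands = []
--     for cut in bridges:
--         u, v = (cut[0], cut[1]) if cut[0] < cut[1] else (cut[1], cut[0])
--         reach = _reach(adj, u, v)
--         out_len = sum(1 for x in nodes_set if x not in reach)
--         if out_len:
--             cands.append((min(len(reach), out_len), (u, v)))
--     return min(cands)[1] if cands else None
-- ===== Notes on version B (the rewrite author's own statement) =====
-- stated objective: alternative
-- what changed: Per-bridge reachability is computed by layered frontier saturation (whole-frontier rounds, no stack and no per-node pop/seen-check) instead of A's explicit DFS stack; the opposite side's size is obtained by counting nodes_set members outside the reached set instead of materialising a set difference; and the winner is a single min over a collected candidate list instead of A's running best with manual key comparison.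
import Mathlib
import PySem

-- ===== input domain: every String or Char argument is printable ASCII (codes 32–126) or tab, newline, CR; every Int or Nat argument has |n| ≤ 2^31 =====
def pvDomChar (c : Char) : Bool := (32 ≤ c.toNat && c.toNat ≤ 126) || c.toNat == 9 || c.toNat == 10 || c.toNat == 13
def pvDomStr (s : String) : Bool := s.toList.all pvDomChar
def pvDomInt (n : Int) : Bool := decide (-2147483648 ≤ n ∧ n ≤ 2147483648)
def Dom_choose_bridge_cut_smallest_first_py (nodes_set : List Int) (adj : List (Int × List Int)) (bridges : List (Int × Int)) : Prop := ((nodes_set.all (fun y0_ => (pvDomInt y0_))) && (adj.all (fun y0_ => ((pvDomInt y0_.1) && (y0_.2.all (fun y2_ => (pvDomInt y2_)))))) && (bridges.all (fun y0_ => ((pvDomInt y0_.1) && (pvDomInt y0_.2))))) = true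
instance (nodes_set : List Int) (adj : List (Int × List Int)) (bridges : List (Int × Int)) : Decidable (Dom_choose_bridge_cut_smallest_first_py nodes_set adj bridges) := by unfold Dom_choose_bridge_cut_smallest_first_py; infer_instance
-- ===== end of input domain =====

-- B replaces A's per-bridge stack DFS by layered frontier saturation, builds the candidate list
-- once and takes a single lexicographic min; objective: alternative (same asymptotic cost).

-- shared primitive: Python's adj.get(x, ())
def pvAdjGet (adj : List (Int × List Int)) (x : Int) : List Int :=
  PySem.Dict.getD (PySem.Dict.mk adj) x []

-- shared primitive: Python's '<' on the tuple (small, (u, v)) — lexicographic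
def pvTupLt (a b : Int × (Int × Int)) : Bool :=
  a.1 < b.1 || (a.1 == b.1 && (a.2.1 < b.2.1 || (a.2.1 == b.2.1 && a.2.2 < b.2.2)))

-- universe of every node the traversals can ever visit (start node plus all adjacency values)
def pvUnivList (u : Int) (adj : List (Int × List Int)) : List Int :=
  PySem.Set.ofList (u :: adj.flatMap (fun p => p.2))

-- ===== PORT A =====
-- fuel for A's 'while stack' loop (the Python loop has none; this bound provably never runs out)
def pvFuelA (u : Int) (adj : List (Int × List Int)) : Nat :=
  (((pvUnivList u adj).map (fun x => 1 + (pvAdjGet adj x).length)).sum) + 2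

-- A's bfs: explicit stack + seen set.  The port pops at the FRONT where Python's list.pop() pops
-- at the back: only the traversal order differs, and 'seen' is a Python set consumed
-- order-insensitively (membership / len), so the port is exact.
def pvBfsA (adj : List (Int × List Int)) (bu bv : Int) :
    Nat → List Int → PySem.Set Int → PySem.Set Int
  | 0, _, seen => seen
  | _ + 1, [], seen => seen
  | fuel + 1, x :: stack, seen =>
    if PySem.Set.contains seen x then pvBfsA adj bu bv fuel stack seen
    else
      let seen' := PySem.Set.add seen x
      let pushes := (pvAdjGet adj x).filter
        (fun w => !(((x == bu) && (w == bv)) || ((x == bv) && (w == bu)))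
                  && !(PySem.Set.contains seen' w))
      pvBfsA adj bu bv fuel (pushes ++ stack) seen'

def choose_bridge_cut_smallest_first_py (nodes_set : List Int) (adj : List (Int × List Int)) (bridges : List (Int × Int)) : Option (Int × Int) :=
  let best := bridges.foldl (fun best cut =>
    let uv := if cut.1 < cut.2 then (cut.1, cut.2) else (cut.2, cut.1)
    let u_side := pvBfsA adj uv.1 uv.2 (pvFuelA uv.1 adj) [uv.1] PySem.Set.empty
    let v_side := PySem.Set.diff nodes_set u_side
    if u_side.isEmpty || v_side.isEmpty then best
    else
      let key := (min (PySem.List.len u_side) (PySem.List.len v_side), uv)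
      match best with
      | none => some (key, uv)
      | some b => if pvTupLt key b.1 then some (key, uv) else best) none
  best.map (fun b => b.2)

-- ===== PORT B =====
-- fuel for B's 'while frontier' loop (provably never runs out)
def pvFuelB (u : Int) (adj : List (Int × List Int)) : Nat :=
  (pvUnivList u adj).length + 2

-- one saturation round: every new node one allowed edge away from the frontier
def pvNext (adj : List (Int × List Int)) (bu bv : Int)
    (reach frontier : PySem.Set Int) : PySem.Set Int :=
  frontier.foldl (fun acc x =>
    (pvAdjGet adj x).foldl (fun acc w =>
      if ((x == bu) && (w == bv)) || ((x == bv) && (w == bu)) then acc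
      else if PySem.Set.contains reach w then acc
      else PySem.Set.add acc w) acc) []

def pvReachB (adj : List (Int × List Int)) (bu bv : Int) :
    Nat → PySem.Set Int → PySem.Set Int → PySem.Set Int
  | 0, reach, _ => reach
  | fuel + 1, reach, frontier =>
    if frontier.isEmpty then reach
    else
      let nxt := pvNext adj bu bv reach frontier
      pvReachB adj bu bv fuel (PySem.Set.union reach nxt) nxt

def choose_bridge_cut_smallest_first_py_alt (nodes_set : List Int) (adj : List (Int × List Int)) (bridges : List (Int × Int)) : Option (Int × Int) :=
  let cands := bridges.foldl (fun cands cut =>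
    let uv := if cut.1 < cut.2 then (cut.1, cut.2) else (cut.2, cut.1)
    let reach := pvReachB adj uv.1 uv.2 (pvFuelB uv.1 adj) [uv.1] [uv.1]
    let out_len := (nodes_set.map (fun x => if PySem.Set.contains reach x then (0 : Int) else 1)).sum
    if out_len ≠ 0 then cands ++ [(min (PySem.List.len reach) out_len, uv)] else cands) []
  -- min(cands) ported by hand: Python's tuple '<' is lexicographic (Lean's Prod '<' is pointwise)
  (cands.foldl (fun m c => match m with
      | none => some c
      | some m' => if pvTupLt c m' then some c else some m') none).map (fun c => c.2)

-- ===== PRECONDITION & SPEC =====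
def Spec_choose_bridge_cut_smallest_first_py (nodes_set : List Int) (adj : List (Int × List Int)) (bridges : List (Int × Int)) (out : Option (Int × Int)) : Prop := out = choose_bridge_cut_smallest_first_py_alt nodes_set adj bridges
instance (nodes_set : List Int) (adj : List (Int × List Int)) (bridges : List (Int × Int)) (out : Option (Int × Int)) : Decidable (Spec_choose_bridge_cut_smallest_first_py nodes_set adj bridges out) := by unfold Spec_choose_bridge_cut_smallest_first_py; infer_instance

-- ===== CLAIM (what is proved, stated in full; the proofs are below) =====
def Claim_equal_choose_bridge_cut_smallest_first_py : Prop := ∀ (nodes_set : List Int) (adj : List (Int × List Int)) (bridges : List (Int × Int)), Dom_choose_bridge_cut_smallest_first_py nodes_set adj bridges → Spec_choose_bridge_cut_smallest_first_py nodes_set adj bridges (choose_bridge_cut_smallest_first_py nodes_set adj bridges)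

-- ===== LEMMAS AND PROOFS =====

-- the edge relation both traversals follow: an adjacency arc that is not the removed bridge
def pvStep (adj : List (Int × List Int)) (bu bv a w : Int) : Prop :=
  w ∈ pvAdjGet adj a ∧ ¬((a = bu ∧ w = bv) ∨ (a = bv ∧ w = bu))

-- nodes the adjacency can ever emit lie in the universe
lemma pvAdjGet_sub_univ (u : Int) (adj : List (Int × List Int)) (x w : Int)
    (hw : w ∈ pvAdjGet adj x) : w ∈ pvUnivList u adj := by
  have hdef : pvAdjGet adj x = ((adj.find? (fun p => p.1 == x)).map Prod.snd).getD [] := by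
    simp [pvAdjGet, PySem.Dict.getD, PySem.Dict.get?]
  rw [hdef] at hw
  rw [pvUnivList, PySem.Set.mem_ofList]
  cases hfind : adj.find? (fun p => p.1 == x) with
  | none => rw [hfind] at hw; simp at hw
  | some p =>
    rw [hfind] at hw; simp at hw
    exact List.mem_cons_of_mem _ (List.mem_flatMap.mpr ⟨p, List.mem_of_find?_eq_some hfind, hw⟩)

lemma mem_pvUnivList_self (u : Int) (adj : List (Int × List Int)) : u ∈ pvUnivList u adj := by
  rw [pvUnivList, PySem.Set.mem_ofList]; exact List.mem_cons_self

-- a closed set containing u contains everything reachable from u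
lemma pvClosed_reach (adj : List (Int × List Int)) (bu bv : Int) (S : List Int)
    (hcl : ∀ a ∈ S, ∀ w, pvStep adj bu bv a w → w ∈ S) (x y : Int)
    (hx : x ∈ S) (hr : Relation.ReflTransGen (pvStep adj bu bv) x y) : y ∈ S := by
  induction hr with
  | refl => exact hx
  | tail _ hstep ih => exact hcl _ ih _ hstep

-- splitting off one fresh element from a filtered sum over a nodup list
lemma pvSum_filter_split (g : Int → Nat) (l : List Int) (hl : l.Nodup) (x : Int) (hx : x ∈ l)
    (p q : Int → Bool) (hpx : p x = true) (hq : ∀ y, q y = (p y && !(y == x))) :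
    ((l.filter p).map g).sum = g x + ((l.filter q).map g).sum := by
  induction l with
  | nil => cases hx
  | cons a t ih =>
    have hnd := List.nodup_cons.mp hl
    by_cases hax : a = x
    · subst hax
      have hqa : q a = false := by rw [hq]; simp
      have hfq : t.filter q = t.filter p := by
        apply List.filter_congr
        intro y hy
        rw [hq]
        have : y ≠ a := fun h => hnd.1 (h ▸ hy)
        simp [this]
      simp [hpx, hqa, hfq]
    · have hxt : x ∈ t := by
        rcases List.mem_cons.mp hx with h | h
        · exact absurd h.symm hax
        · exact h
      have hqa : q a = p a := by rw [hq]; simp [hax]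
      have := ih hnd.2 hxt
      cases hpa : p a with
      | false => simpa [List.filter_cons, hpa, hqa] using this
      | true =>
        have h1 : (a :: t).filter p = a :: t.filter p := by simp [hpa]
        have h2 : (a :: t).filter q = a :: t.filter q := by
          simp [hqa, hpa]
        rw [h1, h2]
        simp only [List.map_cons, List.sum_cons]
        omega

-- the DFS loop of A: characterisation of the final seen set
lemma pvBfsA_go (adj : List (Int × List Int)) (bu bv u : Int) :
    ∀ (fuel : Nat) (stack : List Int) (seen : PySem.Set Int),
    (∀ x ∈ stack, x ∈ pvUnivList u adj) →
    seen.Nodup →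
    (∀ a ∈ seen, ∀ w, pvStep adj bu bv a w → w ∈ seen ∨ w ∈ stack) →
    (((pvUnivList u adj).filter (fun y => !(PySem.Set.contains seen y))).map
        (fun x => 1 + (pvAdjGet adj x).length)).sum + stack.length ≤ fuel →
    (pvBfsA adj bu bv fuel stack seen).Nodup ∧
    (∀ y ∈ seen, y ∈ pvBfsA adj bu bv fuel stack seen) ∧
    (∀ x ∈ stack, x ∈ pvBfsA adj bu bv fuel stack seen) ∧
    (∀ a ∈ pvBfsA adj bu bv fuel stack seen, ∀ w, pvStep adj bu bv a w →
        w ∈ pvBfsA adj bu bv fuel stack seen) ∧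
    (∀ y ∈ pvBfsA adj bu bv fuel stack seen,
        y ∈ seen ∨ ∃ x ∈ stack, Relation.ReflTransGen (pvStep adj bu bv) x y) := by
  intro fuel
  induction fuel with
  | zero =>
    intro stack seen hstack hnd hcl hfuel
    have hstack0 : stack = [] := by
      cases stack with
      | nil => rfl
      | cons a t => simp at hfuel
    subst hstack0
    simp only [pvBfsA]
    refine ⟨hnd, fun y hy => hy, by simp, ?_, fun y hy => Or.inl hy⟩
    intro a ha w hs
    rcases hcl a ha w hs with h | h
    · exact h
    · simp at h
  | succ f ih =>
    intro stack seen hstack hnd hcl hfuel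
    cases stack with
    | nil =>
      simp only [pvBfsA]
      refine ⟨hnd, fun y hy => hy, by simp, ?_, fun y hy => Or.inl hy⟩
      intro a ha w hs
      rcases hcl a ha w hs with h | h
      · exact h
      · simp at h
    | cons x t =>
      by_cases hxs : x ∈ seen
      · have hc : PySem.Set.contains seen x = true := (PySem.Set.contains_iff seen x).mpr hxs
        have hred : pvBfsA adj bu bv (f + 1) (x :: t) seen = pvBfsA adj bu bv f t seen := by
          simp only [pvBfsA, hc, if_true]
        rw [hred]
        have h1 : ∀ y ∈ t, y ∈ pvUnivList u adj :=
          fun y hy => hstack y (List.mem_cons_of_mem _ hy)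
        have h2 : ∀ a ∈ seen, ∀ w, pvStep adj bu bv a w → w ∈ seen ∨ w ∈ t := by
          intro a ha w hw
          rcases hcl a ha w hw with h | h
          · exact Or.inl h
          · rcases List.mem_cons.mp h with h | h
            · exact Or.inl (h ▸ hxs)
            · exact Or.inr h
        have h3 : (((pvUnivList u adj).filter (fun y => !(PySem.Set.contains seen y))).map
            (fun x => 1 + (pvAdjGet adj x).length)).sum + t.length ≤ f := by
          simp only [List.length_cons] at hfuel; omega
        obtain ⟨N, P1, P2, P3, P4⟩ := ih t seen h1 hnd h2 h3
        refine ⟨N, P1, ?_, P3, ?_⟩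
        · intro z hz
          rcases List.mem_cons.mp hz with h | h
          · exact P1 z (h ▸ hxs)
          · exact P2 z h
        · intro y hy
          rcases P4 y hy with h | ⟨x', hx', hr⟩
          · exact Or.inl h
          · exact Or.inr ⟨x', List.mem_cons_of_mem _ hx', hr⟩
      · have hc : PySem.Set.contains seen x = false := by
          rw [← Bool.not_eq_true, PySem.Set.contains_iff]; exact hxs
        have hadd : PySem.Set.add seen x = seen ++ [x] := by
          simp [PySem.Set.add, PySem.Set.contains] at hc ⊢
          intro h; exact absurd h hxs
        set seen' := PySem.Set.add seen x with hseen'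
        set pushes := (pvAdjGet adj x).filter
          (fun w => !(((x == bu) && (w == bv)) || ((x == bv) && (w == bu)))
                    && !(PySem.Set.contains seen' w)) with hpushes
        have hred : pvBfsA adj bu bv (f + 1) (x :: t) seen =
            pvBfsA adj bu bv f (pushes ++ t) seen' := by
          simp only [pvBfsA, hc]
          rfl
        have hmemadd : ∀ y, y ∈ seen' ↔ y ∈ seen ∨ y = x := fun y => PySem.Set.mem_add seen x y
        have hmempush : ∀ w, w ∈ pushes ↔ pvStep adj bu bv x w ∧ w ∉ seen' := by
          intro w
          rw [hpushes, List.mem_filter]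
          constructor
          · rintro ⟨hw, hb⟩
            simp only [Bool.and_eq_true, Bool.not_eq_true', Bool.or_eq_false_iff,
              Bool.and_eq_false_iff] at hb
            refine ⟨⟨hw, ?_⟩, ?_⟩
            · rintro (⟨h1, h2⟩ | ⟨h1, h2⟩)
              · rcases hb.1.1 with h | h <;> simp [h1, h2] at h
              · rcases hb.1.2 with h | h <;> simp [h1, h2] at h
            · intro hmem
              have hfalse : PySem.Set.contains seen' w = false := hb.2
              rw [(PySem.Set.contains_iff seen' w).mpr hmem] at hfalse
              cases hfalse
          · rintro ⟨⟨hw, hcut⟩, hns⟩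
            refine ⟨hw, ?_⟩
            have hc1 : (((x == bu) && (w == bv)) || ((x == bv) && (w == bu))) = false := by
              rw [Bool.or_eq_false_iff]
              constructor
              · by_cases h1 : x = bu
                · by_cases h2 : w = bv
                  · exact absurd (Or.inl ⟨h1, h2⟩) hcut
                  · simp [h2]
                · simp [h1]
              · by_cases h1 : x = bv
                · by_cases h2 : w = bu
                  · exact absurd (Or.inr ⟨h1, h2⟩) hcut
                  · simp [h2]
                · simp [h1]
            simp [hc1]
            exact hns
        have hxuniv : x ∈ pvUnivList u adj := hstack x List.mem_cons_self
        have h1 : ∀ y ∈ pushes ++ t, y ∈ pvUnivList u adj := by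
          intro y hy
          rcases List.mem_append.mp hy with h | h
          · exact pvAdjGet_sub_univ u adj x y (List.mem_of_mem_filter h)
          · exact hstack y (List.mem_cons_of_mem _ h)
        have hnd' : seen'.Nodup := PySem.Set.nodup_add seen x hnd
        have hcl' : ∀ a ∈ seen', ∀ w, pvStep adj bu bv a w → w ∈ seen' ∨ w ∈ pushes ++ t := by
          intro a ha w hw
          rcases (hmemadd a).mp ha with h | h
          · rcases hcl a h w hw with h2 | h2
            · exact Or.inl ((hmemadd w).mpr (Or.inl h2))
            · rcases List.mem_cons.mp h2 with h3 | h3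
              · exact Or.inl ((hmemadd w).mpr (Or.inr h3))
              · exact Or.inr (List.mem_append.mpr (Or.inr h3))
          · subst h
            by_cases hws : w ∈ seen'
            · exact Or.inl hws
            · exact Or.inr (List.mem_append.mpr (Or.inl ((hmempush w).mpr ⟨hw, hws⟩)))
        have hfuel' : (((pvUnivList u adj).filter (fun y => !(PySem.Set.contains seen' y))).map
            (fun x => 1 + (pvAdjGet adj x).length)).sum + (pushes ++ t).length ≤ f := by
          have hnduniv : (pvUnivList u adj).Nodup := by
            rw [pvUnivList]; exact PySem.Set.nodup_ofList _
          have hpx : (fun y => !(PySem.Set.contains seen y)) x = true := by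
            simp only [Bool.not_eq_true']
            exact hc
          have hq : ∀ y, (fun y => !(PySem.Set.contains seen' y)) y =
              ((fun y => !(PySem.Set.contains seen y)) y && !(y == x)) := by
            intro y
            simp only [hadd, PySem.Set.contains, List.contains_append, Bool.not_or]
            by_cases hyx : y = x <;> simp [hyx]
          have hsplit := pvSum_filter_split (fun x => 1 + (pvAdjGet adj x).length)
            (pvUnivList u adj) hnduniv x hxuniv _ _ hpx hq
          have hplen : pushes.length ≤ (pvAdjGet adj x).length := List.length_filter_le _ _
          have hgx : (fun z => 1 + (pvAdjGet adj z).length) x = 1 + (pvAdjGet adj x).length := rfl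
          rw [hgx] at hsplit
          rw [List.length_append]
          simp only [List.length_cons] at hfuel
          omega
        obtain ⟨N, P1, P2, P3, P4⟩ := ih (pushes ++ t) seen' h1 hnd' hcl' hfuel'
        rw [hred]
        refine ⟨N, ?_, ?_, P3, ?_⟩
        · exact fun y hy => P1 y ((hmemadd y).mpr (Or.inl hy))
        · intro z hz
          rcases List.mem_cons.mp hz with h | h
          · exact P1 z ((hmemadd z).mpr (Or.inr h))
          · exact P2 z (List.mem_append.mpr (Or.inr h))
        · intro y hy
          rcases P4 y hy with h | ⟨x', hx', hr⟩
          · rcases (hmemadd y).mp h with h2 | h2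
            · exact Or.inl h2
            · exact Or.inr ⟨x, List.mem_cons_self, h2 ▸ Relation.ReflTransGen.refl⟩
          · rcases List.mem_append.mp hx' with h2 | h2
            · exact Or.inr ⟨x, List.mem_cons_self,
                Relation.ReflTransGen.head ((hmempush x').mp h2).1 hr⟩
            · exact Or.inr ⟨x', List.mem_cons_of_mem _ h2, hr⟩

-- A's per-bridge component is exactly the set of nodes reachable from u
lemma pvBfsA_good (adj : List (Int × List Int)) (u v : Int) :
    (pvBfsA adj u v (pvFuelA u adj) [u] PySem.Set.empty).Nodup ∧
    ∀ y, y ∈ pvBfsA adj u v (pvFuelA u adj) [u] PySem.Set.empty ↔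
      Relation.ReflTransGen (pvStep adj u v) u y := by
  have hstack : ∀ x ∈ [u], x ∈ pvUnivList u adj := by
    intro x hx
    rw [List.mem_singleton] at hx
    exact hx ▸ mem_pvUnivList_self u adj
  have hnd : (PySem.Set.empty : PySem.Set Int).Nodup := List.nodup_nil
  have hcl : ∀ a ∈ (PySem.Set.empty : PySem.Set Int), ∀ w, pvStep adj u v a w →
      w ∈ (PySem.Set.empty : PySem.Set Int) ∨ w ∈ [u] := by
    intro a ha
    cases ha
  have hfilt : (pvUnivList u adj).filter
      (fun y => !(PySem.Set.contains (PySem.Set.empty : PySem.Set Int) y)) = pvUnivList u adj := by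
    apply List.filter_eq_self.mpr
    intro a _
    rfl
  have hfuel : (((pvUnivList u adj).filter
      (fun y => !(PySem.Set.contains (PySem.Set.empty : PySem.Set Int) y))).map
        (fun x => 1 + (pvAdjGet adj x).length)).sum + ([u] : List Int).length ≤ pvFuelA u adj := by
    rw [hfilt, pvFuelA]
    simp
  obtain ⟨N, P1, P2, P3, P4⟩ :=
    pvBfsA_go adj u v u (pvFuelA u adj) [u] PySem.Set.empty hstack hnd hcl hfuel
  refine ⟨N, fun y => ⟨?_, ?_⟩⟩
  · intro hy
    rcases P4 y hy with h | ⟨x, hx, hr⟩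
    · cases h
    · rw [List.mem_singleton] at hx
      exact hx ▸ hr
  · intro hr
    exact pvClosed_reach adj u v _ P3 u y (P2 u List.mem_cons_self) hr

-- boolean form of the removed-bridge test
lemma pvCutBool (x w bu bv : Int) :
    ((((x == bu) && (w == bv)) || ((x == bv) && (w == bu))) = true) ↔
      ((x = bu ∧ w = bv) ∨ (x = bv ∧ w = bu)) := by
  simp

-- membership in the inner fold of one saturation round
lemma pvNextInner_mem (bu bv : Int) (reach : PySem.Set Int)
    (x : Int) : ∀ (l : List Int) (acc : PySem.Set Int) (y : Int),
    y ∈ l.foldl (fun acc w =>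
      if ((x == bu) && (w == bv)) || ((x == bv) && (w == bu)) then acc
      else if PySem.Set.contains reach w then acc
      else PySem.Set.add acc w) acc ↔
    y ∈ acc ∨ (y ∈ l ∧ ¬((x = bu ∧ y = bv) ∨ (x = bv ∧ y = bu)) ∧ y ∉ reach) := by
  intro l
  induction l with
  | nil => intro acc y; simp
  | cons w t ih =>
    intro acc y
    rw [List.foldl_cons, ih]
    by_cases hcut : (x = bu ∧ w = bv) ∨ (x = bv ∧ w = bu)
    · have hc1 := (pvCutBool x w bu bv).mpr hcut
      rw [hc1]
      simp only [if_true, List.mem_cons]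
      constructor
      · rintro (h | h)
        · exact Or.inl h
        · exact Or.inr ⟨Or.inr h.1, h.2⟩
      · rintro (h | ⟨hmem, hP⟩)
        · exact Or.inl h
        · rcases hmem with h | h
          · exact absurd (h ▸ hcut) hP.1
          · exact Or.inr ⟨h, hP⟩
    · have hc1 : (((x == bu) && (w == bv)) || ((x == bv) && (w == bu))) = false := by
        cases h : (((x == bu) && (w == bv)) || ((x == bv) && (w == bu))) with
        | false => rfl
        | true => exact absurd ((pvCutBool x w bu bv).mp h) hcut
      rw [hc1]
      simp only [Bool.false_eq_true, if_false]
      by_cases hr : w ∈ reach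
      · have hc2 : PySem.Set.contains reach w = true := (PySem.Set.contains_iff reach w).mpr hr
        rw [hc2]
        simp only [if_true, List.mem_cons]
        constructor
        · rintro (h | h)
          · exact Or.inl h
          · exact Or.inr ⟨Or.inr h.1, h.2⟩
        · rintro (h | ⟨hmem, hP⟩)
          · exact Or.inl h
          · rcases hmem with h | h
            · exact absurd (h ▸ hr) hP.2
            · exact Or.inr ⟨h, hP⟩
      · have hc2 : PySem.Set.contains reach w = false := by
          cases h : PySem.Set.contains reach w with
          | false => rfl
          | true => exact absurd ((PySem.Set.contains_iff reach w).mp h) hr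
        rw [hc2]
        simp only [Bool.false_eq_true, if_false, PySem.Set.mem_add, List.mem_cons]
        constructor
        · rintro (⟨h | h⟩ | h)
          · exact Or.inl h
          · exact Or.inr ⟨Or.inl h, h ▸ hcut, h ▸ hr⟩
          · exact Or.inr ⟨Or.inr h.1, h.2⟩
        · rintro (h | ⟨hmem, hP⟩)
          · exact Or.inl (Or.inl h)
          · rcases hmem with h | h
            · exact Or.inl (Or.inr h)
            · exact Or.inr ⟨h, hP⟩

-- membership in one saturation round, generalised over the accumulator
lemma pvNext_go_mem (adj : List (Int × List Int)) (bu bv : Int) (reach : PySem.Set Int) :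
    ∀ (frontier : List Int) (acc : PySem.Set Int) (y : Int),
    y ∈ frontier.foldl (fun acc x =>
      (pvAdjGet adj x).foldl (fun acc w =>
        if ((x == bu) && (w == bv)) || ((x == bv) && (w == bu)) then acc
        else if PySem.Set.contains reach w then acc
        else PySem.Set.add acc w) acc) acc ↔
    y ∈ acc ∨ ((∃ x ∈ frontier, pvStep adj bu bv x y) ∧ y ∉ reach) := by
  intro frontier
  induction frontier with
  | nil => intro acc y; simp
  | cons x fr ih =>
    intro acc y
    rw [List.foldl_cons, ih, pvNextInner_mem bu bv reach x]
    simp only [pvStep, List.mem_cons]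
    constructor
    · rintro ((h | ⟨h1, h2, h3⟩) | ⟨⟨x', hx', hs⟩, hr⟩)
      · exact Or.inl h
      · exact Or.inr ⟨⟨x, Or.inl rfl, h1, h2⟩, h3⟩
      · exact Or.inr ⟨⟨x', Or.inr hx', hs⟩, hr⟩
    · rintro (h | ⟨⟨x', hx', hs⟩, hr⟩)
      · exact Or.inl (Or.inl h)
      · rcases hx' with h | h
        · exact Or.inl (Or.inr ⟨h ▸ hs.1, h ▸ hs.2, hr⟩)
        · exact Or.inr ⟨⟨x', h, hs⟩, hr⟩

-- membership in one saturation round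
lemma mem_pvNext (adj : List (Int × List Int)) (bu bv : Int)
    (reach frontier : PySem.Set Int) (y : Int) :
    y ∈ pvNext adj bu bv reach frontier ↔
      (∃ x ∈ frontier, pvStep adj bu bv x y) ∧ y ∉ reach := by
  rw [pvNext, pvNext_go_mem]
  simp

-- the saturation loop of B: characterisation of the final reach set
lemma pvReachB_go (adj : List (Int × List Int)) (bu bv u : Int) :
    ∀ (fuel : Nat) (reach frontier : PySem.Set Int),
    reach.Nodup →
    (∀ x ∈ frontier, x ∈ reach) →
    (∀ a ∈ reach, a ∉ frontier → ∀ w, pvStep adj bu bv a w → w ∈ reach) →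
    (∀ y ∈ reach, y ∈ pvUnivList u adj) →
    ((pvUnivList u adj).filter (fun y => !(PySem.Set.contains reach y))).length + 2 ≤ fuel →
    (pvReachB adj bu bv fuel reach frontier).Nodup ∧
    (∀ y ∈ reach, y ∈ pvReachB adj bu bv fuel reach frontier) ∧
    (∀ a ∈ pvReachB adj bu bv fuel reach frontier, ∀ w, pvStep adj bu bv a w →
        w ∈ pvReachB adj bu bv fuel reach frontier) ∧
    (∀ y ∈ pvReachB adj bu bv fuel reach frontier,
        y ∈ reach ∨ ∃ x ∈ frontier, Relation.ReflTransGen (pvStep adj bu bv) x y) := by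
  intro fuel
  induction fuel with
  | zero =>
    intro reach frontier _ _ _ _ hfuel
    exact absurd hfuel (by omega)
  | succ f ih =>
    intro reach frontier hnd hfr hcl hsub hfuel
    by_cases hfe : frontier.isEmpty
    · have hred : pvReachB adj bu bv (f + 1) reach frontier = reach := by
        simp [pvReachB, hfe]
      rw [hred]
      have hfr0 : frontier = [] := List.isEmpty_iff.mp hfe
      refine ⟨hnd, fun y hy => hy, ?_, fun y hy => Or.inl hy⟩
      intro a ha w hs
      exact hcl a ha (by rw [hfr0]; simp) w hs
    · have hfeb : frontier.isEmpty = false := by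
        cases h : frontier.isEmpty with
        | false => rfl
        | true => exact absurd h hfe
      have hred : pvReachB adj bu bv (f + 1) reach frontier =
          pvReachB adj bu bv f
            (PySem.Set.union reach (pvNext adj bu bv reach frontier))
            (pvNext adj bu bv reach frontier) := by
        rw [pvReachB, hfeb]
        rfl
      set nxt := pvNext adj bu bv reach frontier with hnxt
      set reach' := PySem.Set.union reach nxt with hreach'
      have hmemu : ∀ y, y ∈ reach' ↔ y ∈ reach ∨ y ∈ nxt :=
        fun y => PySem.Set.mem_union reach nxt y
      have hmnxt : ∀ y, y ∈ nxt ↔ (∃ x ∈ frontier, pvStep adj bu bv x y) ∧ y ∉ reach :=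
        fun y => mem_pvNext adj bu bv reach frontier y
      have hnd' : reach'.Nodup := PySem.Set.nodup_union reach nxt hnd
      have hfr' : ∀ x ∈ nxt, x ∈ reach' := fun x hx => (hmemu x).mpr (Or.inr hx)
      have hcl' : ∀ a ∈ reach', a ∉ nxt → ∀ w, pvStep adj bu bv a w → w ∈ reach' := by
        intro a ha hanxt w hs
        rcases (hmemu a).mp ha with h | h
        · by_cases haf : a ∈ frontier
          · by_cases hwreach : w ∈ reach
            · exact (hmemu w).mpr (Or.inl hwreach)
            · exact (hmemu w).mpr (Or.inr ((hmnxt w).mpr ⟨⟨a, haf, hs⟩, hwreach⟩))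
          · exact (hmemu w).mpr (Or.inl (hcl a h haf w hs))
        · exact absurd h hanxt
      have hsub' : ∀ y ∈ reach', y ∈ pvUnivList u adj := by
        intro y hy
        rcases (hmemu y).mp hy with h | h
        · exact hsub y h
        · rcases (hmnxt y).mp h with ⟨⟨x, _, hs⟩, _⟩
          exact pvAdjGet_sub_univ u adj x y hs.1
      by_cases hnx : nxt = []
      · obtain ⟨f', rfl⟩ : ∃ f', f = f' + 1 := ⟨f - 1, by omega⟩
        have hret : pvReachB adj bu bv (f' + 1) reach' nxt = reach' := by
          rw [hnx]
          simp [pvReachB]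
        rw [hred, hret]
        refine ⟨hnd', fun y hy => (hmemu y).mpr (Or.inl hy), ?_, ?_⟩
        · intro a ha w hs
          rcases (hmemu a).mp ha with h | h
          · by_cases haf : a ∈ frontier
            · by_cases hw : w ∈ reach
              · exact (hmemu w).mpr (Or.inl hw)
              · have : w ∈ nxt := (hmnxt w).mpr ⟨⟨a, haf, hs⟩, hw⟩
                rw [hnx] at this
                cases this
            · exact (hmemu w).mpr (Or.inl (hcl a h haf w hs))
          · rw [hnx] at h
            cases h
        · intro y hy
          rcases (hmemu y).mp hy with h | h
          · exact Or.inl h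
          · rw [hnx] at h
            cases h
      · have hfuel' : ((pvUnivList u adj).filter
            (fun y => !(PySem.Set.contains reach' y))).length + 2 ≤ f := by
          obtain ⟨z, hz⟩ := List.exists_mem_of_ne_nil nxt hnx
          have hz1 : z ∉ reach := ((hmnxt z).mp hz).2
          have hz2 : z ∈ reach' := (hmemu z).mpr (Or.inr hz)
          have hzu : z ∈ pvUnivList u adj := hsub' z hz2
          have hnduniv : (pvUnivList u adj).Nodup := by
            rw [pvUnivList]
            exact PySem.Set.nodup_ofList _
          have hpz : (fun y => !(PySem.Set.contains reach y)) z = true := by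
            simp only [Bool.not_eq_true']
            cases h : PySem.Set.contains reach z with
            | false => rfl
            | true => exact absurd ((PySem.Set.contains_iff reach z).mp h) hz1
          have hsplit := pvSum_filter_split (fun _ => (1 : Nat)) (pvUnivList u adj) hnduniv z
            hzu (fun y => !(PySem.Set.contains reach y))
            (fun y => (!(PySem.Set.contains reach y)) && !(y == z)) hpz (fun y => rfl)
          have hsum1 : ∀ l : List Int, (l.map (fun _ => (1 : Nat))).sum = l.length := by
            intro l
            simp
          rw [hsum1, hsum1] at hsplit
          have hone : ((fun _ => (1 : Nat)) z) = 1 := rfl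
          rw [hone] at hsplit
          have hmono : ((pvUnivList u adj).filter
              (fun y => !(PySem.Set.contains reach' y))).length ≤
              ((pvUnivList u adj).filter
                (fun y => (!(PySem.Set.contains reach y)) && !(y == z))).length := by
            rw [← List.countP_eq_length_filter, ← List.countP_eq_length_filter]
            apply List.countP_mono_left
            intro a _ ha
            simp only [Bool.not_eq_true'] at ha
            have hamem : a ∉ reach' := by
              intro hmem
              rw [(PySem.Set.contains_iff reach' a).mpr hmem] at ha
              cases ha
            simp only [Bool.and_eq_true, Bool.not_eq_true', beq_eq_false_iff_ne]
            constructor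
            · cases h : PySem.Set.contains reach a with
              | false => rfl
              | true =>
                exact absurd ((hmemu a).mpr (Or.inl ((PySem.Set.contains_iff reach a).mp h)))
                  hamem
            · intro h
              exact hamem (h ▸ hz2)
          omega
        obtain ⟨N, P1, P3, P4⟩ := ih reach' nxt hnd' hfr' hcl' hsub' hfuel'
        rw [hred]
        refine ⟨N, fun y hy => P1 y ((hmemu y).mpr (Or.inl hy)), P3, ?_⟩
        intro y hy
        rcases P4 y hy with h | ⟨x, hx, hr⟩
        · rcases (hmemu y).mp h with h | h
          · exact Or.inl h
          · rcases (hmnxt y).mp h with ⟨⟨x, hxf, hs⟩, _⟩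
            exact Or.inr ⟨x, hxf, Relation.ReflTransGen.single hs⟩
        · rcases (hmnxt x).mp hx with ⟨⟨x0, hx0, hs0⟩, _⟩
          exact Or.inr ⟨x0, hx0, Relation.ReflTransGen.head hs0 hr⟩

-- B's per-bridge component is exactly the set of nodes reachable from u
lemma pvReachB_good (adj : List (Int × List Int)) (u v : Int) :
    (pvReachB adj u v (pvFuelB u adj) [u] [u]).Nodup ∧
    ∀ y, y ∈ pvReachB adj u v (pvFuelB u adj) [u] [u] ↔
      Relation.ReflTransGen (pvStep adj u v) u y := by
  have hnd : ([u] : List Int).Nodup := List.nodup_singleton u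
  have hfr : ∀ x ∈ ([u] : List Int), x ∈ ([u] : List Int) := fun x hx => hx
  have hcl : ∀ a ∈ ([u] : List Int), a ∉ ([u] : List Int) → ∀ w, pvStep adj u v a w →
      w ∈ ([u] : List Int) := by
    intro a ha hna
    exact absurd ha hna
  have hsub : ∀ y ∈ ([u] : List Int), y ∈ pvUnivList u adj := by
    intro y hy
    rw [List.mem_singleton] at hy
    exact hy ▸ mem_pvUnivList_self u adj
  have hfuel : ((pvUnivList u adj).filter
      (fun y => !(PySem.Set.contains ([u] : List Int) y))).length + 2 ≤ pvFuelB u adj := by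
    rw [pvFuelB]
    have := List.length_filter_le (fun y => !(PySem.Set.contains ([u] : List Int) y))
      (pvUnivList u adj)
    omega
  obtain ⟨N, P1, P3, P4⟩ := pvReachB_go adj u v u (pvFuelB u adj) [u] [u] hnd hfr hcl hsub hfuel
  refine ⟨N, fun y => ⟨?_, ?_⟩⟩
  · intro hy
    rcases P4 y hy with h | ⟨x, hx, hr⟩
    · rw [List.mem_singleton] at h
      exact h ▸ Relation.ReflTransGen.refl
    · rw [List.mem_singleton] at hx
      exact hx ▸ hr
  · intro hr
    exact pvClosed_reach adj u v _ P3 u y (P1 u List.mem_cons_self) hr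

-- B's 0/1-indicator sum over nodes_set is the length of the corresponding filter
lemma pvSumIndicator (t : List Int) : ∀ l : List Int,
    (l.map (fun x => if PySem.Set.contains t x then (0 : Int) else 1)).sum =
      ((l.filter (fun x => !(PySem.Set.contains t x))).length : Int) := by
  intro l
  induction l with
  | nil => simp
  | cons a l ih =>
    rw [List.map_cons, List.sum_cons, List.filter_cons, ih]
    cases h : PySem.Set.contains t a
    · simp
      omega
    · simp

-- per-bridge: A's side data and B's side data agree
lemma pvPerCut (nodes_set : List Int) (adj : List (Int × List Int)) (u v : Int) :
    (pvBfsA adj u v (pvFuelA u adj) [u] PySem.Set.empty).isEmpty = false ∧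
    PySem.List.len (PySem.Set.diff nodes_set (pvBfsA adj u v (pvFuelA u adj) [u] PySem.Set.empty)) =
      (nodes_set.map (fun x =>
        if PySem.Set.contains (pvReachB adj u v (pvFuelB u adj) [u] [u]) x then (0 : Int) else 1)).sum ∧
    PySem.List.len (pvBfsA adj u v (pvFuelA u adj) [u] PySem.Set.empty) =
      PySem.List.len (pvReachB adj u v (pvFuelB u adj) [u] [u]) := by
  obtain ⟨hndA, hmemA⟩ := pvBfsA_good adj u v
  obtain ⟨hndB, hmemB⟩ := pvReachB_good adj u v
  have hiff : ∀ y, y ∈ pvBfsA adj u v (pvFuelA u adj) [u] PySem.Set.empty ↔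
      y ∈ pvReachB adj u v (pvFuelB u adj) [u] [u] :=
    fun y => (hmemA y).trans (hmemB y).symm
  have hperm : (pvBfsA adj u v (pvFuelA u adj) [u] PySem.Set.empty).Perm
      (pvReachB adj u v (pvFuelB u adj) [u] [u]) :=
    (List.perm_ext_iff_of_nodup hndA hndB).mpr hiff
  refine ⟨?_, ?_, ?_⟩
  · have hu : u ∈ pvBfsA adj u v (pvFuelA u adj) [u] PySem.Set.empty :=
      (hmemA u).mpr Relation.ReflTransGen.refl
    cases hSA : pvBfsA adj u v (pvFuelA u adj) [u] PySem.Set.empty with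
    | nil => rw [hSA] at hu; cases hu
    | cons a t => rfl
  · rw [pvSumIndicator]
    have hdiff : PySem.Set.diff nodes_set (pvBfsA adj u v (pvFuelA u adj) [u] PySem.Set.empty) =
        nodes_set.filter (fun x =>
          !(PySem.Set.contains (pvBfsA adj u v (pvFuelA u adj) [u] PySem.Set.empty) x)) := rfl
    rw [hdiff, PySem.List.len_eq]
    have hfc : nodes_set.filter (fun x =>
        !(PySem.Set.contains (pvBfsA adj u v (pvFuelA u adj) [u] PySem.Set.empty) x)) =
        nodes_set.filter (fun x =>
          !(PySem.Set.contains (pvReachB adj u v (pvFuelB u adj) [u] [u]) x)) := by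
      apply List.filter_congr
      intro x _
      have : PySem.Set.contains (pvBfsA adj u v (pvFuelA u adj) [u] PySem.Set.empty) x =
          PySem.Set.contains (pvReachB adj u v (pvFuelB u adj) [u] [u]) x := by
        cases h1 : PySem.Set.contains (pvBfsA adj u v (pvFuelA u adj) [u] PySem.Set.empty) x
        · cases h2 : PySem.Set.contains (pvReachB adj u v (pvFuelB u adj) [u] [u]) x
          · rfl
          · have hmem := (hiff x).mpr ((PySem.Set.contains_iff _ x).mp h2)
            rw [(PySem.Set.contains_iff _ x).mpr hmem] at h1
            cases h1
        · cases h2 : PySem.Set.contains (pvReachB adj u v (pvFuelB u adj) [u] [u]) x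
          · have hmem := (hiff x).mp ((PySem.Set.contains_iff _ x).mp h1)
            rw [(PySem.Set.contains_iff _ x).mpr hmem] at h2
            cases h2
          · rfl
      rw [this]
    rw [hfc]
  · rw [PySem.List.len_eq, PySem.List.len_eq, hperm.length_eq]

-- the interleaved best-tracking fold of A against B's collect-then-min pipeline
lemma pvMainFold (nodes_set : List Int) (adj : List (Int × List Int)) :
    ∀ (bridges : List (Int × Int)) (best : Option ((Int × (Int × Int)) × (Int × Int)))
      (cands : List (Int × (Int × Int))),
    best = (cands.foldl (fun m c => match m with
        | none => some c
        | some m' => if pvTupLt c m' then some c else some m') none).map (fun c => (c, c.2)) →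
    bridges.foldl (fun best cut =>
      let uv := if cut.1 < cut.2 then (cut.1, cut.2) else (cut.2, cut.1)
      let u_side := pvBfsA adj uv.1 uv.2 (pvFuelA uv.1 adj) [uv.1] PySem.Set.empty
      let v_side := PySem.Set.diff nodes_set u_side
      if u_side.isEmpty || v_side.isEmpty then best
      else
        let key := (min (PySem.List.len u_side) (PySem.List.len v_side), uv)
        match best with
        | none => some (key, uv)
        | some b => if pvTupLt key b.1 then some (key, uv) else best) best =
    ((bridges.foldl (fun cands cut =>
      let uv := if cut.1 < cut.2 then (cut.1, cut.2) else (cut.2, cut.1)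
      let reach := pvReachB adj uv.1 uv.2 (pvFuelB uv.1 adj) [uv.1] [uv.1]
      let out_len := (nodes_set.map (fun x =>
        if PySem.Set.contains reach x then (0 : Int) else 1)).sum
      if out_len ≠ 0 then cands ++ [(min (PySem.List.len reach) out_len, uv)] else cands) cands).foldl
        (fun m c => match m with
          | none => some c
          | some m' => if pvTupLt c m' then some c else some m') none).map (fun c => (c, c.2)) := by
  intro bridges
  induction bridges with
  | nil =>
    intro best cands hinv
    exact hinv
  | cons cut rest ih =>
    intro best cands hinv
    rw [List.foldl_cons, List.foldl_cons]
    apply ih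
    dsimp only
    obtain ⟨hne, hlen1, hlen2⟩ := pvPerCut nodes_set adj
      (if cut.1 < cut.2 then (cut.1, cut.2) else (cut.2, cut.1)).1
      (if cut.1 < cut.2 then (cut.1, cut.2) else (cut.2, cut.1)).2
    set uv := if cut.1 < cut.2 then (cut.1, cut.2) else (cut.2, cut.1) with huv
    set SA := pvBfsA adj uv.1 uv.2 (pvFuelA uv.1 adj) [uv.1] PySem.Set.empty with hSA
    set SB := pvReachB adj uv.1 uv.2 (pvFuelB uv.1 adj) [uv.1] [uv.1] with hSB
    set vside := PySem.Set.diff nodes_set SA with hvside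
    set out_len := (nodes_set.map (fun x =>
      if PySem.Set.contains SB x then (0 : Int) else 1)).sum with hout
    rw [hne, Bool.false_or]
    by_cases h0 : out_len = 0
    · have hvlen0 : (vside.length : Int) = 0 := by
        rw [← PySem.List.len_eq, hlen1]
        exact h0
      have hve : vside.isEmpty = true := by
        rw [List.isEmpty_iff_length_eq_zero]
        omega
      rw [hve, if_pos rfl, if_neg (by omega)]
      exact hinv
    · have hvlenne : (vside.length : Int) ≠ 0 := by
        rw [← PySem.List.len_eq, hlen1]
        exact h0
      have hve : vside.isEmpty = false := by
        cases h : vside.isEmpty with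
        | false => rfl
        | true =>
          rw [List.isEmpty_iff_length_eq_zero] at h
          exact absurd (by rw [h]; rfl) hvlenne
      rw [hve, if_neg (by simp), if_pos h0]
      rw [List.foldl_append, List.foldl_cons, List.foldl_nil]
      rw [hinv, hlen2, hlen1]
      cases hm : cands.foldl (fun m c => match m with
          | none => some c
          | some m' => if pvTupLt c m' then some c else some m') none with
      | none => rfl
      | some m' =>
        simp only [Option.map_some]
        cases hlt : pvTupLt (min (PySem.List.len SB) out_len, uv) m' with
        | false => simp
        | true => simp

-- Option.map composition used to finish
lemma pvMapMap (m : Option (Int × (Int × Int))) :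
    (m.map (fun c => (c, c.2))).map
      (fun b : (Int × (Int × Int)) × (Int × Int) => b.2) = m.map (fun c => c.2) := by
  cases m <;> rfl

-- ===== VERDICT (by name: the statement is the Claim_ definition above) =====
theorem choose_bridge_cut_smallest_first_py_spec : Claim_equal_choose_bridge_cut_smallest_first_py := by
  intro nodes_set adj bridges _
  show choose_bridge_cut_smallest_first_py nodes_set adj bridges =
    choose_bridge_cut_smallest_first_py_alt nodes_set adj bridges
  show (bridges.foldl (fun best cut =>
      let uv := if cut.1 < cut.2 then (cut.1, cut.2) else (cut.2, cut.1)
      let u_side := pvBfsA adj uv.1 uv.2 (pvFuelA uv.1 adj) [uv.1] PySem.Set.empty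
      let v_side := PySem.Set.diff nodes_set u_side
      if u_side.isEmpty || v_side.isEmpty then best
      else
        let key := (min (PySem.List.len u_side) (PySem.List.len v_side), uv)
        match best with
        | none => some (key, uv)
        | some b => if pvTupLt key b.1 then some (key, uv) else best) none).map (fun b => b.2) =
    ((bridges.foldl (fun cands cut =>
      let uv := if cut.1 < cut.2 then (cut.1, cut.2) else (cut.2, cut.1)
      let reach := pvReachB adj uv.1 uv.2 (pvFuelB uv.1 adj) [uv.1] [uv.1]
      let out_len := (nodes_set.map (fun x =>
        if PySem.Set.contains reach x then (0 : Int) else 1)).sum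
      if out_len ≠ 0 then cands ++ [(min (PySem.List.len reach) out_len, uv)] else cands) []).foldl
        (fun m c => match m with
          | none => some c
          | some m' => if pvTupLt c m' then some c else some m') none).map (fun c => c.2)
  rw [pvMainFold nodes_set adj bridges none [] rfl]
  exact pvMapMap _
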